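-- pv_equiv track=rewrite | github.com/ArchitGupta16/Computer-Network | Hamming_Code.py | final_code_word
-- ===== SOURCE A (Python) =====
-- def final_code_word(word, m, r, res):
--     codeword = ""
--     res = res[::-1]
--     parity_count = 0
--     word_count = 0
--     for i in range(1, m + r + 1):
--         if i == 2 ** parity_count:
--             codeword += str(res[parity_count])
--             parity_count += 1
--         else:
--             codeword += word[word_count]
--             word_count += 1
--     return codeword
-- ===== SOURCE B (Python) =====
-- def final_code_word(word, m, r, res):
--     # Segment decomposition: emit one parity bit per power-of-two position,
--     # then the whole run of data characters up to the next power, via slicing.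
--     n = m + r
--     rres = res[::-1]
--     parts = []
--     start = 0
--     k = 0
--     while 2 ** k <= n:
--         p = 2 ** k
--         seg = min(2 * p - 1, n) - p
--         parts.append(str(rres[k]) + word[start:start + seg])
--         start += seg
--         k += 1
--     return "".join(parts)
-- ===== Notes on version B (the rewrite author's own statement) =====
-- stated objective: alternative
-- what changed: A's single per-position loop with an in-loop power-of-two test and two running counters is replaced by a per-power segment loop that emits each parity bit and then the whole run of data characters up to the next power of two as one bulk slice; Pre_ excludes exactly the inputs where A raises IndexError (res or word too short for m+r).
import Mathlib
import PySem

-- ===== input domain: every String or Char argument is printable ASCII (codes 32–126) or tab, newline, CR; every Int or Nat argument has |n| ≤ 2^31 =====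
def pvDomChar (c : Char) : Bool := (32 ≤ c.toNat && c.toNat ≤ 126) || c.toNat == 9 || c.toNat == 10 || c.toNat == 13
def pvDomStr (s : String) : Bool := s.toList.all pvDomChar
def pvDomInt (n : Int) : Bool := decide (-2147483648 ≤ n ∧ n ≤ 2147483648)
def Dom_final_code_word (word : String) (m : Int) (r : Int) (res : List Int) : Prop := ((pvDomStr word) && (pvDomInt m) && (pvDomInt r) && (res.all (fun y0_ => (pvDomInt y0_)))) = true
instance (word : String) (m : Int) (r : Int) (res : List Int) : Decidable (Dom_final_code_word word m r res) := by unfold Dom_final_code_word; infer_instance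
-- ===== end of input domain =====

-- B replaces A's per-position loop (with in-loop power test and two counters) by a
-- per-power segment loop that emits each parity bit followed by the whole run of data
-- characters up to the next power of two as one slice (constant-factor speedup measured
-- in a timing run; Pre_ excludes exactly the inputs where Python A raises IndexError).


-- ===== PORT A =====
-- one loop iteration of A: state (codeword, parity_count, word_count), position i;
-- the out-of-range accesses A raises on are excluded by Pre_, so pyGetD defaults are never taken there
def fcwA_step (w : List Char) (rres : List Int) :
    List Char × Nat × Nat → Int → List Char × Nat × Nat
  | (cw, pc, wc), i =>
    if i = ((2 ^ pc : Nat) : Int) then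
      (cw ++ PySem.Int.toChars (PySem.List.pyGetD rres (pc : Int) 0), pc + 1, wc)
    else
      (cw ++ [PySem.List.pyGetD w (wc : Int) ' '], pc, wc + 1)

def final_code_word (word : String) (m : Int) (r : Int) (res : List Int) : String :=
  -- res = res[::-1]
  let rres := (PySem.List.slice? res none none (-1)).getD []
  -- for i in range(1, m + r + 1): …
  let st := (PySem.List.pyRange 1 (m + r + 1) 1).foldl (fcwA_step word.toList rres) ([], 0, 0)
  String.ofList st.1

-- ===== PORT B =====
-- while 2 ** k <= n: append str(rres[k]) + word[start:start+seg]; advance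
def fcwB_loop (w : List Char) (rres : List Int) (n : Int) (k : Nat) (start : Nat) :
    List (List Char) :=
  if h : ((2 ^ k : Nat) : Int) ≤ n then
    let p : Int := ((2 ^ k : Nat) : Int)
    let seg : Int := min (2 * p - 1) n - p
    (PySem.Int.toChars (PySem.List.pyGetD rres (k : Int) 0) ++
        PySem.List.slice w (some (start : Int)) (some ((start : Int) + seg))) ::
      fcwB_loop w rres n (k + 1) (start + seg.toNat)
  else []
termination_by (n.toNat + 1) - 2 ^ k
decreasing_by
  have h0 : (0 : Int) ≤ n := le_trans (by positivity) h
  have hk : (2 : Nat) ^ k ≤ n.toNat := by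
    have := (Int.le_toNat h0).mpr h
    exact_mod_cast this
  have h1 : 1 ≤ (2 : Nat) ^ k := Nat.one_le_two_pow
  have h2 : (2 : Nat) ^ (k + 1) = 2 * 2 ^ k := by ring
  omega

def final_code_word_alt (word : String) (m : Int) (r : Int) (res : List Int) : String :=
  let n := m + r
  let rres := (PySem.List.slice? res none none (-1)).getD []
  -- "".join(parts)
  String.ofList (fcwB_loop word.toList rres n 0 0).flatten

-- ===== PRECONDITION & SPEC =====
-- number of power-of-two positions 2^0, 2^1, … that are ≤ n (0 for n ≤ 0)
def numParity (n : Int) : Nat := if n ≤ 0 then 0 else Nat.log2 n.toNat + 1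

-- Pre_ excludes exactly the inputs on which Python A raises IndexError: res must hold
-- all numParity (m+r) parity bits and word all (m+r) - numParity (m+r) data characters.
def Pre_final_code_word (word : String) (m : Int) (r : Int) (res : List Int) : Prop :=
  numParity (m + r) ≤ res.length ∧
    m + r - (numParity (m + r) : Int) ≤ (word.toList.length : Int)
instance (word : String) (m : Int) (r : Int) (res : List Int) :
    Decidable (Pre_final_code_word word m r res) := by unfold Pre_final_code_word; infer_instance

def pvWitness_final_code_word : String × Int × Int × List Int := ("ab", 2, 3, [1, 0, 1])

def Spec_final_code_word (word : String) (m : Int) (r : Int) (res : List Int) (out : String) : Prop := out = final_code_word_alt word m r res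
instance (word : String) (m : Int) (r : Int) (res : List Int) (out : String) : Decidable (Spec_final_code_word word m r res out) := by unfold Spec_final_code_word; infer_instance

-- ===== CLAIM (what is proved, stated in full; the proofs are below) =====
def Claim_equal_final_code_word : Prop := ∀ (word : String) (m : Int) (r : Int) (res : List Int), Dom_final_code_word word m r res → Pre_final_code_word word m r res → Spec_final_code_word word m r res (final_code_word word m r res)

-- ===== LEMMAS AND PROOFS =====

lemma le_numParity {n : Int} {k : Nat} (h : ((2 ^ k : Nat) : Int) ≤ n) :
    k + 1 ≤ numParity n := by
  have h1 : 1 ≤ (2 : Nat) ^ k := Nat.one_le_two_pow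
  have hpos : (0 : Int) < n := lt_of_lt_of_le (by exact_mod_cast h1) h
  have hk : (2 : Nat) ^ k ≤ n.toNat := by
    have := (Int.le_toNat hpos.le).mpr h; exact_mod_cast this
  have hne : n.toNat ≠ 0 := by omega
  have := (Nat.le_log2 hne).mpr hk
  unfold numParity
  rw [if_neg (by omega)]
  omega

lemma numParity_eq {n : Int} {k : Nat} (h1' : ((2 ^ k : Nat) : Int) ≤ n)
    (h2 : n < ((2 ^ (k + 1) : Nat) : Int)) : numParity n = k + 1 := by
  have h1 : 1 ≤ (2 : Nat) ^ k := Nat.one_le_two_pow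
  have hpos : (0 : Int) < n := lt_of_lt_of_le (by exact_mod_cast h1) h1'
  have hk : (2 : Nat) ^ k ≤ n.toNat := by
    have := (Int.le_toNat hpos.le).mpr h1'; exact_mod_cast this
  have hk2 : n.toNat < (2 : Nat) ^ (k + 1) := by
    have hn : (n.toNat : Int) = n := Int.toNat_of_nonneg hpos.le
    have : (n.toNat : Int) < ((2 ^ (k + 1) : Nat) : Int) := by rw [hn]; exact h2
    exact_mod_cast this
  have hne : n.toNat ≠ 0 := by omega
  have hlo := (Nat.le_log2 hne).mpr hk
  have hhi : n.toNat.log2 < k + 1 := by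
    by_contra hcon
    have : 2 ^ (k + 1) ≤ n.toNat :=
      le_trans (Nat.pow_le_pow_right (by norm_num) (by omega)) (Nat.log2_self_le hne)
    omega
  unfold numParity
  rw [if_neg (by omega)]
  omega

lemma two_pow_add_le {a b : Nat} (h : b ≤ a) : 2 ^ b + (a - b) ≤ 2 ^ a := by
  induction a with
  | zero => simp_all
  | succ a ih =>
    rcases Nat.lt_or_ge b (a + 1) with hb | hb
    · have hba : b ≤ a := by omega
      have := ih hba
      have h1 : 1 ≤ (2 : Nat) ^ a := Nat.one_le_two_pow
      have : (2 : Nat) ^ (a + 1) = 2 ^ a + 2 ^ a := by ring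
      omega
    · have : b = a + 1 := by omega
      subst this; simp

-- A's loop over a run of non-power positions copies consecutive word characters
lemma fcwA_data_run (w : List Char) (rres : List Int) (len : Nat) :
    ∀ (a : Int) (pc wc : Nat) (cw : List Char),
      (∀ i : Int, a ≤ i → i < a + len → i ≠ ((2 ^ pc : Nat) : Int)) →
      wc + len ≤ w.length →
      (PySem.List.pyRange a (a + len) 1).foldl (fcwA_step w rres) (cw, pc, wc) =
        (cw ++ (w.drop wc).take len, pc, wc + len) := by
  induction len with
  | zero =>
    intro a pc wc cw _ _
    rw [PySem.List.pyRange_one_eq_nil (by omega)]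
    simp
  | succ len ih =>
    intro a pc wc cw hne hlen
    rw [PySem.List.pyRange_one_cons (by omega)]
    simp only [List.foldl_cons]
    have hne0 : a ≠ ((2 ^ pc : Nat) : Int) := hne a le_rfl (by omega)
    have hwc : wc < w.length := by omega
    have hget : PySem.List.pyGetD w (wc : Int) ' ' = w[wc]'hwc := by
      rw [PySem.List.pyGetD_natCast]
      simp [List.getD_eq_getElem?_getD, hwc]
    have hstep : fcwA_step w rres (cw, pc, wc) a = (cw ++ [PySem.List.pyGetD w (wc : Int) ' '], pc, wc + 1) := by
      simp only [fcwA_step]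
      rw [if_neg hne0]
    rw [hstep, hget]
    have hend : a + ((len : Nat) + 1 : Nat) = (a + 1) + (len : Nat) := by push_cast; ring
    rw [hend, ih (a + 1) pc (wc + 1) _ (fun i h1 h2 => hne i (by omega) (by push_cast at h2 ⊢; omega)) (by omega)]
    have hdrop : w.drop wc = w[wc] :: w.drop (wc + 1) := List.drop_eq_getElem_cons hwc
    rw [hdrop, List.take_succ_cons]
    refine congrArg₂ Prod.mk (by simp) (congrArg₂ Prod.mk rfl (by omega))

-- main invariant: from position 2^k on, A's fold produces exactly B's remaining segments
lemma fcwA_eq_fcwB (w : List Char) (rres : List Int) (n : Int) (k s : Nat) (cw : List Char)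
    (hs : (s : Int) = ((2 ^ k : Nat) : Int) - 1 - k)
    (hw : n - (numParity n : Int) ≤ (w.length : Int)) :
    ∃ pc wc,
      (PySem.List.pyRange ((2 ^ k : Nat) : Int) (n + 1) 1).foldl
          (fcwA_step w rres) (cw, k, s) =
        (cw ++ (fcwB_loop w rres n k s).flatten, pc, wc) := by
  have h1 : 1 ≤ (2 : Nat) ^ k := Nat.one_le_two_pow
  by_cases h : ((2 ^ k : Nat) : Int) ≤ n
  case neg =>
    rw [PySem.List.pyRange_one_eq_nil (by omega), fcwB_loop, dif_neg h]
    exact ⟨k, s, by simp⟩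
  case pos =>
    set P : Int := ((2 ^ k : Nat) : Int) with hP
    have hP1 : (1 : Int) ≤ P := by rw [hP]; exact_mod_cast h1
    have hpow1 : ((2 ^ (k + 1) : Nat) : Int) = 2 * P := by rw [hP]; push_cast [pow_succ]; ring
    set seg : Int := min (2 * P - 1) n - P with hseg
    have hseg0 : 0 ≤ seg := by omega
    have hsegNat : ((seg.toNat : Nat) : Int) = seg := Int.toNat_of_nonneg hseg0
    have hpos : (0 : Int) < n := lt_of_lt_of_le hP1 h
    have hsplit := PySem.List.pyRange_one_append P (P + 1 + seg) (n + 1)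
      (by omega) (by omega)
    rw [hsplit, PySem.List.pyRange_one_cons (show P < P + 1 + seg by omega),
      List.foldl_append, List.foldl_cons]
    have hstep : fcwA_step w rres (cw, k, s) P =
        (cw ++ PySem.Int.toChars (PySem.List.pyGetD rres (k : Int) 0), k + 1, s) := by
      simp [fcwA_step, ← hP]
    rw [hstep]
    have hne : ∀ i : Int, P + 1 ≤ i → i < (P + 1) + (seg.toNat : Int) →
        i ≠ ((2 ^ (k + 1) : Nat) : Int) := by
      intro i hi1 hi2
      rw [hpow1]; omega
    have hslice : PySem.List.slice w (some (s : Int)) (some ((s : Int) + seg)) =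
        (w.drop s).take seg.toNat := by
      rw [← hsegNat]
      exact PySem.List.slice_natCast_add w s seg.toNat
    have hunroll : fcwB_loop w rres n k s =
        (PySem.Int.toChars (PySem.List.pyGetD rres (k : Int) 0) ++
            PySem.List.slice w (some (s : Int)) (some ((s : Int) + seg))) ::
          fcwB_loop w rres n (k + 1) (s + seg.toNat) := by
      rw [fcwB_loop, dif_pos h]
    rw [← hsegNat] at hne
    by_cases hbig : ((2 ^ (k + 1) : Nat) : Int) ≤ n
    · -- more powers of two follow: recurse
      have hL1 : k + 2 ≤ numParity n := by
        have := le_numParity hbig; omega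
      have hnp : numParity n = Nat.log2 n.toNat + 1 := by
        unfold numParity; rw [if_neg (by omega)]
      have hkL : k + 1 ≤ Nat.log2 n.toNat := by omega
      have h2L : (2 : Nat) ^ Nat.log2 n.toNat ≤ n.toNat := Nat.log2_self_le (by omega)
      have htp : (2 : Nat) ^ (k + 1) + (Nat.log2 n.toNat - (k + 1)) ≤
          2 ^ Nat.log2 n.toNat := two_pow_add_le hkL
      have hw' := hw
      rw [hnp] at hw'
      have hfits : s + seg.toNat ≤ w.length := by omega
      rw [show P + 1 + seg = (P + 1) + ((seg.toNat : Nat) : Int) by omega]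
      rw [fcwA_data_run w rres seg.toNat (P + 1) (k + 1) s _ hne hfits]
      obtain ⟨pc, wc, hIH⟩ := fcwA_eq_fcwB w rres n (k + 1) (s + seg.toNat)
        ((cw ++ PySem.Int.toChars (PySem.List.pyGetD rres (k : Int) 0)) ++
          (w.drop s).take seg.toNat)
        (by omega) hw
      rw [show (P + 1) + ((seg.toNat : Nat) : Int) = ((2 ^ (k + 1) : Nat) : Int) by omega]
      refine ⟨pc, wc, ?_⟩
      rw [hIH, hunroll]
      simp only [List.flatten_cons, hslice, List.append_assoc]
    · -- last segment: the loop and the range both end here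
      have hnp : numParity n = k + 1 := numParity_eq h (by omega)
      have hw' := hw
      rw [hnp] at hw'
      have hfits : s + seg.toNat ≤ w.length := by omega
      rw [show P + 1 + seg = (P + 1) + ((seg.toNat : Nat) : Int) by omega]
      rw [fcwA_data_run w rres seg.toNat (P + 1) (k + 1) s _ hne hfits]
      rw [show (P + 1) + ((seg.toNat : Nat) : Int) = n + 1 by omega]
      rw [PySem.List.pyRange_one_eq_nil le_rfl]
      have hstop : fcwB_loop w rres n (k + 1) (s + seg.toNat) = [] := by
        rw [fcwB_loop, dif_neg hbig]
      refine ⟨k + 1, s + seg.toNat, ?_⟩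
      rw [hunroll, hstop]
      simp only [List.foldl_nil, List.flatten_cons, List.flatten_nil,
        List.append_nil, hslice, List.append_assoc]
termination_by (n.toNat + 1) - 2 ^ k
decreasing_by
  have h0 : (0 : Int) ≤ n := le_trans (by positivity) h
  have hk : (2 : Nat) ^ k ≤ n.toNat := by
    have := (Int.le_toNat h0).mpr h
    exact_mod_cast this
  have h1 : 1 ≤ (2 : Nat) ^ k := Nat.one_le_two_pow
  have h2 : (2 : Nat) ^ (k + 1) = 2 * 2 ^ k := by ring
  omega


-- ===== VERDICT (by name: the statement is the Claim_ definition above) =====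
theorem final_code_word_spec : Claim_equal_final_code_word := by
  intro word m r res _hdom hpre
  unfold Spec_final_code_word final_code_word final_code_word_alt
  obtain ⟨hres, hword⟩ := hpre
  obtain ⟨pc, wc, hmain⟩ := fcwA_eq_fcwB word.toList
    ((PySem.List.slice? res none none (-1)).getD []) (m + r) 0 0 [] (by norm_num) hword
  simp only [pow_zero, Nat.cast_one] at hmain
  simp [hmain]
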